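-- pv_equiv track=rewrite | github.com/milosptr/discrete_math_relations | relations.py | aces_in_relation_b
-- ===== SOURCE A (Python) =====
-- def aces_in_relation_b(A: list[int]) -> int:
--   # we find the length of the list A
--   n:int  = len(A)
--   aces:int  = 0
--
--   # condition on the relation is set to be
--   # R = {(a, b) | a = b + 1}
--   # so, we check if the list A is empty
--   if n == 0:
--     return 0
--
--   # in the previous function aces_in_relation_a, we prepared an emtpy matrix
--   # and then we populated it with 1's if the condition was met
--   # in this function we could do the same thing, but since we are not really
--   # using the matrix, we can just count aces without generating a matrix
--   # we just need to check if the element of the list A is equal to the element of the list A + 1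
--   for a in range(n):
--     for b in range(n):
--        if A[a] == A[b] + 1:
--           aces += 1
--
--   return aces
-- ===== SOURCE B (Python) =====
-- def aces_in_relation_b(A: list[int]) -> int:
--   # one pass: frequency table, then sum count[v] * count[v-1] over distinct values
--   cnt = {}
--   for x in A:
--     cnt[x] = cnt.get(x, 0) + 1
--   return sum(c * cnt.get(v - 1, 0) for v, c in cnt.items())
-- ===== Notes on version B (the rewrite author's own statement) =====
-- stated objective: faster
-- what changed: Replaces the quadratic all-pairs index scan with a single-pass frequency dictionary and a sum of count[v]*count[v-1] over distinct values.
import Mathlib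
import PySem

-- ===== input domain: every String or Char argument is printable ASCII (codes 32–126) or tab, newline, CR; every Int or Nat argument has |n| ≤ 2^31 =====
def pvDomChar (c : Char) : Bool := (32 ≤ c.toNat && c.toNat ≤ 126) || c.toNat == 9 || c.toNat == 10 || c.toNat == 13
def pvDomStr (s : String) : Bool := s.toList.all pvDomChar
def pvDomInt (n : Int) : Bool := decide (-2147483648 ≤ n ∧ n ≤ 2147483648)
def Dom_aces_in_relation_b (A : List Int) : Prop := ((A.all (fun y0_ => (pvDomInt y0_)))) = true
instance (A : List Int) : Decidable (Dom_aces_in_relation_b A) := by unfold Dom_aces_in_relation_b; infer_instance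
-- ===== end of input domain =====

-- B replaces A's quadratic all-pairs index scan by a one-pass frequency dictionary and the
-- sum of count[v]*count[v-1] over distinct values (asymptotically faster, O(n) vs O(n^2)).

-- ===== PORT A =====
def aces_in_relation_b (A : List Int) : Int :=
  let n : Int := PySem.List.len A
  let aces : Int := 0
  if n = 0 then 0
  else
    (PySem.List.pyRange 0 n 1).foldl (fun aces a =>
      (PySem.List.pyRange 0 n 1).foldl (fun aces b =>
        if PySem.List.pyGetD A a 0 = PySem.List.pyGetD A b 0 + 1 then aces + 1 else aces)
        aces) aces

-- ===== PORT B =====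
def aces_in_relation_b_alt (A : List Int) : Int :=
  let cnt : PySem.Dict Int Int :=
    A.foldl (fun d x => d.insert x (d.getD x 0 + 1)) PySem.Dict.empty
  (cnt.items.map (fun vc => vc.2 * cnt.getD (vc.1 - 1) 0)).sum

-- ===== PRECONDITION & SPEC =====
def Spec_aces_in_relation_b (A : List Int) (out : Int) : Prop := out = aces_in_relation_b_alt A
instance (A : List Int) (out : Int) : Decidable (Spec_aces_in_relation_b A out) := by unfold Spec_aces_in_relation_b; infer_instance

-- ===== CLAIM (what is proved, stated in full; the proofs are below) =====
def Claim_equal_aces_in_relation_b : Prop := ∀ (A : List Int), Dom_aces_in_relation_b A → Spec_aces_in_relation_b A (aces_in_relation_b A)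

-- ===== LEMMAS AND PROOFS =====

-- A's double loop counts, for each element x of A, the occurrences of x - 1 in A.
theorem aces_A_eq (A : List Int) :
    aces_in_relation_b A = (A.map (fun x => (A.count (x - 1) : Int))).sum := by
  unfold aces_in_relation_b
  rcases A with _ | ⟨h, t⟩
  · simp
  · rw [if_neg (by simp only [PySem.List.len_eq, List.length_cons]; omega)]
    simp only [PySem.List.len_eq]
    rw [PySem.List.foldl_pyRange_zero_pyGetD' (h :: t) 0
      (f := fun aces x =>
        (PySem.List.pyRange 0 ((h :: t).length : Int) 1).foldl
          (fun aces b => if x = PySem.List.pyGetD (h :: t) b 0 + 1 then aces + 1 else aces) aces) 0]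
    rw [PySem.List.foldl_congr_mem (h :: t) _
      (fun aces x => aces + ((h :: t).count (x - 1) : Int)) 0
      (by
        intro acc x _
        rw [PySem.List.foldl_pyRange_zero_pyGetD' (h :: t) 0
          (f := fun aces y => if x = y + 1 then aces + 1 else aces) acc]
        rw [PySem.List.foldl_ite_add_one]
        congr 1
        rw [List.count]
        norm_cast
        apply List.countP_congr
        intro y _
        by_cases hxy : x = y + 1
        · simp [hxy]
        · simp [hxy]
          omega)]
    rw [PySem.List.foldl_add]
    simp

-- B is the sum of count v * count (v-1) over the distinct values of A.
theorem aces_B_eq (A : List Int) :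
    aces_in_relation_b_alt A =
      ((PySem.Set.ofList A).map (fun k => (A.count k : Int) * (A.count (k - 1) : Int))).sum := by
  simp only [aces_in_relation_b_alt, PySem.Dict.foldl_insert_getD_add_one_eq_counter,
    PySem.Dict.items_counter, List.map_map]
  congr 1
  apply List.map_congr_left
  intro k _
  simp [PySem.Dict.getD_counter]

theorem sums_agree (A : List Int) :
    (A.map (fun x => (A.count (x - 1) : Int))).sum =
      ((PySem.Set.ofList A).map (fun k => (A.count k : Int) * (A.count (k - 1) : Int))).sum := by
  rw [Finset.sum_list_map_count A (fun x => (A.count (x - 1) : Int))]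
  rw [← List.sum_toFinset _ (PySem.Set.nodup_ofList A)]
  have hfin : (PySem.Set.ofList A).toFinset = A.toFinset := by
    ext x; simp [List.mem_toFinset, PySem.Set.mem_ofList]
  rw [hfin]
  apply Finset.sum_congr rfl
  intro x _
  simp

-- ===== VERDICT (by name: the statement is the Claim_ definition above) =====
theorem aces_in_relation_b_spec : Claim_equal_aces_in_relation_b := by
  intro A _
  unfold Spec_aces_in_relation_b
  rw [aces_A_eq, aces_B_eq, sums_agree]
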